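-- pv_equiv track=rewrite | github.com/rHermes/contests | dmoj/hhpc1/hhpc1p4.py | solve
-- ===== SOURCE A (Python) =====
-- def solve(c):
--     sols = []
--     for a in range(c+1, 2*c):
--         b, res = divmod(a*c, a-c)
--         if res == 0:
--             sols.append((a,b))
--
--     sols.append((2*c, 2*c))
--
--     # for a,b in list(sols)[:-1]:
--     #     sols.append((b,a))
--
--     return sols
-- ===== SOURCE B (Python) =====
-- def solve(c):
--     # Solutions a in (c, 2c) correspond to divisors d = a - c of c*c with d < c:
--     # a = c + d, b = c + c*c // d.  Find divisors of c via trial division up to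
--     # sqrt(c), form divisors of c*c below c as products of two divisors of c.
--     divs_c = []
--     i = 1
--     while i * i <= c:
--         if c % i == 0:
--             divs_c.append(i)
--             if i != c // i:
--                 divs_c.append(c // i)
--         i += 1
--     ds = sorted({x * y for x in divs_c for y in divs_c if x * y < c})
--     return [(c + d, c + (c * c) // d) for d in ds] + [(2 * c, 2 * c)]
-- ===== Notes on version B (the rewrite author's own statement) =====
-- stated objective: faster
-- what changed: Instead of scanning every a in (c, 2c) and testing divmod(a*c, a-c), B finds the divisors of c by trial division up to sqrt(c), forms the divisors of c^2 below c as pairwise products of divisors of c (a set comprehension dedups), sorts them, and maps each divisor d to (c+d, c+c*c//d).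
import Mathlib
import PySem

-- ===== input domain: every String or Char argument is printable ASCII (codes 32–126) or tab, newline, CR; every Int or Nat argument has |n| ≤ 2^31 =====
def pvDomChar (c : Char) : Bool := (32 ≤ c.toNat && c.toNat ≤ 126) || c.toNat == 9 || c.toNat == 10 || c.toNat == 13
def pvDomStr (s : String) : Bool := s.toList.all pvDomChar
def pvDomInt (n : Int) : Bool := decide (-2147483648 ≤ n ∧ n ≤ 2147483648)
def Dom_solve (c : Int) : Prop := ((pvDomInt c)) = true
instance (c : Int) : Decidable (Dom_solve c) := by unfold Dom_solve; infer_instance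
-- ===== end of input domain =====

-- B replaces A's O(c) scan over a ∈ (c, 2c) by divisor enumeration: divisors of c by
-- trial division up to √c, then divisors of c² below c as products of two divisors of c
-- (objective: faster, asymptotically; measured).

-- ===== PORT A =====
-- divmod(a*c, a-c) is ported as the pair (floordiv, mod); a - c ≥ 1 on the range, so it never raises.
def solve (c : Int) : List (Int × Int) :=
  let sols : List (Int × Int) :=
    (PySem.List.pyRange (c+1) (2*c) 1).foldl
      (fun sols a =>
        let b := PySem.Int.floordiv (a*c) (a-c)
        let res := PySem.Int.mod (a*c) (a-c)
        if res = 0 then sols ++ [(a, b)] else sols) []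
  sols ++ [(2*c, 2*c)]

-- ===== PORT B =====
-- the `while i * i <= c` loop of Source B collecting the divisors of c
def dcLoop (c i : Int) (dc : List Int) : List Int :=
  if h : i * i ≤ c then
    let dc' :=
      if PySem.Int.mod c i = 0 then
        (if i ≠ PySem.Int.floordiv c i
          then dc ++ [i] ++ [PySem.Int.floordiv c i]
          else dc ++ [i])
      else dc
    dcLoop c (i+1) dc'
  else dc
termination_by (c + 1 - i).toNat
decreasing_by
  have hic : i ≤ c := by
    by_cases h0 : i ≤ 0
    · nlinarith
    · nlinarith
  omega

def solve_alt (c : Int) : List (Int × Int) :=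
  let dc := dcLoop c 1 []
  let ds := PySem.List.sorted
    (PySem.Set.ofList
      (dc.flatMap (fun x => (dc.filter (fun y => x*y < c)).map (fun y => x*y))))
    (fun d => d) false
  ds.map (fun d => (c + d, c + PySem.Int.floordiv (c*c) d)) ++ [(2*c, 2*c)]

-- ===== PRECONDITION & SPEC =====
def Spec_solve (c : Int) (out : List (Int × Int)) : Prop := out = solve_alt c
instance (c : Int) (out : List (Int × Int)) : Decidable (Spec_solve c out) := by unfold Spec_solve; infer_instance

-- ===== CLAIM (what is proved, stated in full; the proofs are below) =====
def Claim_equal_solve : Prop := ∀ (c : Int), Dom_solve c → Spec_solve c (solve c)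

-- ===== LEMMAS AND PROOFS =====

-- c ≤ 1: A's range is empty and B collects no divisor products; both return [(2c, 2c)].
theorem solve_small (c : Int) (hc : c ≤ 1) : solve c = solve_alt c := by
  by_cases h1 : c = 1
  · subst h1
    rw [solve, solve_alt]
    rw [dcLoop]; norm_num
    rw [dcLoop]; norm_num
    simp [PySem.List.sorted]
  · have h0 : c ≤ 0 := by omega
    rw [solve, solve_alt, dcLoop]
    rw [PySem.List.pyRange_one_eq_nil (by omega)]
    simp [show ¬ (1 ≤ c) by omega, PySem.Set.ofList, PySem.List.sorted]

-- A's loop, reindexed by d = a - c: the filtered range of divisor candidates d of c².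
theorem solve_eq_canon (c : Int) (hc : 2 ≤ c) :
    solve c =
      ((PySem.List.pyRange 1 c 1).filter (fun d => decide (PySem.Int.mod (c*c) d = 0))).map
        (fun d => (c + d, c + PySem.Int.floordiv (c*c) d)) ++ [(2*c, 2*c)] := by
  have hshift : PySem.List.pyRange (c+1) (2*c) 1 = (PySem.List.pyRange 1 c 1).map (fun d => c + d) := by
    rw [PySem.List.pyRange_one, PySem.List.pyRange_one, List.map_map]
    rw [show (2*c - (c+1)).toNat = (c - 1).toNat by omega]
    apply List.map_congr_left
    intro k _
    simp; omega
  rw [solve, hshift, List.foldl_map]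
  have hcong :
      List.foldl (fun sols d =>
        if PySem.Int.mod ((c+d)*c) ((c+d)-c) = 0 then
          sols ++ [(c+d, PySem.Int.floordiv ((c+d)*c) ((c+d)-c))] else sols)
        [] (PySem.List.pyRange 1 c 1)
      = List.foldl (fun sols d =>
        if (fun d => decide (PySem.Int.mod (c*c) d = 0)) d = true then
          sols ++ [(c + d, c + PySem.Int.floordiv (c*c) d)] else sols)
        [] (PySem.List.pyRange 1 c 1) := by
    apply PySem.List.foldl_congr_mem
    intro acc d hd
    rw [PySem.List.mem_pyRange_one] at hd
    have hd0 : 0 < d := by omega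
    have hsub : (c+d) - c = d := by ring
    have hmul : (c+d)*c = c*c + d*c := by ring
    simp only [decide_eq_true_eq]
    rw [hsub, hmul, PySem.Int.mod_eq_emod_of_pos hd0, PySem.Int.mod_eq_emod_of_pos hd0,
        PySem.Int.floordiv_eq_ediv_of_pos hd0, PySem.Int.floordiv_eq_ediv_of_pos hd0,
        Int.add_mul_emod_self_left, Int.add_mul_ediv_left _ _ (by omega : d ≠ 0)]
    split_ifs
    · ring_nf
    · rfl
  dsimp only
  rw [hcong, PySem.List.foldl_append_if]
  simp

-- B's trial-division loop: what ends up in the list, for any counter i ≥ 1.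
theorem mem_dcLoop (c i : Int) (dc : List Int) (x : Int) (hi : 1 ≤ i) :
    x ∈ dcLoop c i dc ↔ x ∈ dc ∨ ∃ j, i ≤ j ∧ j*j ≤ c ∧ PySem.Int.mod c j = 0 ∧
      (x = j ∨ (x = PySem.Int.floordiv c j ∧ x ≠ j)) := by
  revert hi
  induction i, dc using dcLoop.induct c with
  | case1 i dc h dc' ih =>
    intro hi
    rw [dcLoop, dif_pos h]
    have ih' := ih (by omega)
    rw [show dc' = (if PySem.Int.mod c i = 0 then
        (if i ≠ PySem.Int.floordiv c i then dc ++ [i] ++ [PySem.Int.floordiv c i] else dc ++ [i])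
        else dc) from by simp only [dc', dite_eq_ite]] at ih'
    simp only at ih' ⊢
    rw [ih']
    by_cases hm : PySem.Int.mod c i = 0
    · by_cases hne : i = PySem.Int.floordiv c i
      · simp only [if_pos hm, if_neg (show ¬ i ≠ PySem.Int.floordiv c i from by simpa using hne)]
        constructor
        · rintro (hx | ⟨j, h1, h2, h3, h4⟩)
          · rcases List.mem_append.1 hx with hx | hx
            · exact Or.inl hx
            · simp at hx
              exact Or.inr ⟨i, le_refl i, h, hm, Or.inl hx⟩
          · exact Or.inr ⟨j, by omega, h2, h3, h4⟩
        · rintro (hx | ⟨j, h1, h2, h3, h4⟩)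
          · exact Or.inl (List.mem_append.2 (Or.inl hx))
          · by_cases hji : j = i
            · subst hji
              rcases h4 with h4 | ⟨h4, h5⟩
              · exact Or.inl (List.mem_append.2 (Or.inr (by simp [h4])))
              · exact absurd (h4.trans hne.symm) h5
            · exact Or.inr ⟨j, by omega, h2, h3, h4⟩
      · simp only [if_pos hm, if_pos (show i ≠ PySem.Int.floordiv c i from hne)]
        constructor
        · rintro (hx | ⟨j, h1, h2, h3, h4⟩)
          · rcases List.mem_append.1 hx with hx | hx
            · rcases List.mem_append.1 hx with hx | hx
              · exact Or.inl hx
              · simp at hx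
                exact Or.inr ⟨i, le_refl i, h, hm, Or.inl hx⟩
            · simp at hx
              by_cases hxi : x = i
              · exact Or.inr ⟨i, le_refl i, h, hm, Or.inl hxi⟩
              · exact Or.inr ⟨i, le_refl i, h, hm, Or.inr ⟨hx, hxi⟩⟩
          · exact Or.inr ⟨j, by omega, h2, h3, h4⟩
        · rintro (hx | ⟨j, h1, h2, h3, h4⟩)
          · exact Or.inl (List.mem_append.2 (Or.inl (List.mem_append.2 (Or.inl hx))))
          · by_cases hji : j = i
            · subst hji
              rcases h4 with h4 | ⟨h4, _⟩
              · exact Or.inl (List.mem_append.2 (Or.inl (List.mem_append.2 (Or.inr (by simp [h4])))))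
              · exact Or.inl (List.mem_append.2 (Or.inr (by simp [h4])))
            · exact Or.inr ⟨j, by omega, h2, h3, h4⟩
    · simp only [if_neg hm]
      constructor
      · rintro (hx | ⟨j, h1, h2, h3, h4⟩)
        · exact Or.inl hx
        · exact Or.inr ⟨j, by omega, h2, h3, h4⟩
      · rintro (hx | ⟨j, h1, h2, h3, h4⟩)
        · exact Or.inl hx
        · by_cases hji : j = i
          · subst hji; exact absurd h3 hm
          · exact Or.inr ⟨j, by omega, h2, h3, h4⟩
  | case2 i dc h =>
    intro hi
    rw [dcLoop, dif_neg h]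
    constructor
    · exact Or.inl
    · rintro (hx | ⟨j, hij, hjj, _⟩)
      · exact hx
      · exfalso
        have hii : i * i ≤ j * j := by nlinarith
        omega

-- Source B's divs_c holds exactly the positive divisors of c.
theorem mem_dc (c x : Int) (hc : 2 ≤ c) :
    x ∈ dcLoop c 1 [] ↔ 0 < x ∧ x ∣ c := by
  rw [mem_dcLoop c 1 [] x le_rfl]
  simp only [List.not_mem_nil, false_or]
  constructor
  · rintro ⟨j, h1, hjj, hmod, hx⟩
    have hj : j ∣ c := (PySem.Int.mod_eq_zero_iff_dvd c j).1 hmod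
    have hj0 : 0 < j := by omega
    rcases hx with rfl | ⟨rfl, _⟩
    · exact ⟨hj0, hj⟩
    · rw [PySem.Int.floordiv_eq_ediv_of_pos hj0]
      have hcq : c / j * j = c := Int.ediv_mul_cancel hj
      constructor
      · nlinarith
      · exact ⟨j, by linarith [hcq.symm]⟩
  · rintro ⟨hx0, hxc⟩
    by_cases hxx : x * x ≤ c
    · exact ⟨x, by omega, hxx, (PySem.Int.mod_eq_zero_iff_dvd c x).2 hxc, Or.inl rfl⟩
    · refine ⟨c / x, ?_, ?_, ?_, Or.inr ⟨?_, ?_⟩⟩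
      case _ =>
        have hcq : c / x * x = c := Int.ediv_mul_cancel hxc
        nlinarith
      case _ =>
        have hcq : c / x * x = c := Int.ediv_mul_cancel hxc
        have hqx : c / x < x := by nlinarith
        have hq0 : 0 < c / x := by nlinarith
        nlinarith
      case _ =>
        apply (PySem.Int.mod_eq_zero_iff_dvd c (c / x)).2
        exact ⟨x, (Int.ediv_mul_cancel hxc).symm⟩
      case _ =>
        have hq0 : 0 < c / x := by
          have hcq : c / x * x = c := Int.ediv_mul_cancel hxc
          nlinarith
        rw [PySem.Int.floordiv_eq_ediv_of_pos hq0]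
        have hcq : c / x * x = c := Int.ediv_mul_cancel hxc
        calc x = (c / x * x) / (c / x) := by rw [Int.mul_ediv_cancel_left _ (by omega)]
        _ = c / (c / x) := by rw [hcq]
      case _ =>
        have hcq : c / x * x = c := Int.ediv_mul_cancel hxc
        have hqx : c / x < x := by nlinarith
        omega

-- a divisor of c² is a product of two divisors of c (via x = gcd(d, c), y = d / x)
theorem dvd_sq_split (c d : Int) (hc : 0 < c) (hd : 0 < d) (h : d ∣ c * c) :
    ∃ x y, 0 < x ∧ 0 < y ∧ x ∣ c ∧ y ∣ c ∧ d = x * y := by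
  set C := c.natAbs with hC
  set D := d.natAbs with hD
  have hDC : D ∣ C * C := by
    have := Int.natAbs_dvd_natAbs.2 h
    rwa [Int.natAbs_mul] at this
  have hD0 : 0 < D := Int.natAbs_pos.2 (by omega)
  have hC0 : 0 < C := Int.natAbs_pos.2 (by omega)
  set g := D.gcd C with hg
  have hg0 : 0 < g := Nat.gcd_pos_of_pos_left _ hD0
  have hgD : g ∣ D := Nat.gcd_dvd_left D C
  have hgC : g ∣ C := Nat.gcd_dvd_right D C
  have hcop : (D / g).Coprime (C / g) := Nat.coprime_div_gcd_div_gcd hg0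
  have hdvd : D / g ∣ (C / g) * C := by
    have h1 : g * (D / g) ∣ g * ((C / g) * C) := by
      rw [Nat.mul_div_cancel' hgD, ← Nat.mul_assoc, Nat.mul_div_cancel' hgC]
      exact hDC
    exact (Nat.mul_dvd_mul_iff_left hg0).1 h1
  have hyC : D / g ∣ C := hcop.dvd_of_dvd_mul_left hdvd
  refine ⟨(g : Int), ((D / g : Nat) : Int), by exact_mod_cast hg0, ?_, ?_, ?_, ?_⟩
  · exact_mod_cast Nat.div_pos (Nat.le_of_dvd hD0 hgD) hg0
  · have : (g : Int) ∣ (C : Int) := Int.natCast_dvd_natCast.2 hgC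
    rwa [hC, Int.natAbs_of_nonneg (by omega)] at this
  · have : ((D / g : Nat) : Int) ∣ (C : Int) := Int.natCast_dvd_natCast.2 hyC
    rwa [hC, Int.natAbs_of_nonneg (by omega)] at this
  · have hDg : g * (D / g) = D := Nat.mul_div_cancel' hgD
    have : d = (D : Int) := by rw [hD, Int.natAbs_of_nonneg (by omega)]
    rw [this, ← Nat.cast_mul, hDg]

-- Source B's set comprehension holds exactly the divisors of c² below c.
theorem mem_prod (c z : Int) (hc : 2 ≤ c) :
    z ∈ (dcLoop c 1 []).flatMap
      (fun x => ((dcLoop c 1 []).filter (fun y => decide (x*y < c))).map (fun y => x*y)) ↔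
    0 < z ∧ z < c ∧ z ∣ c * c := by
  simp only [List.mem_flatMap, List.mem_map, List.mem_filter, decide_eq_true_eq]
  constructor
  · rintro ⟨x, hx, y, ⟨hy, hlt⟩, rfl⟩
    rw [mem_dc c x hc] at hx
    rw [mem_dc c y hc] at hy
    exact ⟨mul_pos hx.1 hy.1, hlt, mul_dvd_mul hx.2 hy.2⟩
  · rintro ⟨hz0, hzc, hzd⟩
    obtain ⟨x, y, hx0, hy0, hxc, hyc, rfl⟩ := dvd_sq_split c z (by omega) hz0 hzd
    exact ⟨x, (mem_dc c x hc).2 ⟨hx0, hxc⟩, y, ⟨(mem_dc c y hc).2 ⟨hy0, hyc⟩, hzc⟩, rfl⟩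

-- Source B's sorted(...) equals the ascending filtered range A's loop walks through
theorem ds_eq (c : Int) (hc : 2 ≤ c) :
    PySem.List.sorted
      (PySem.Set.ofList ((dcLoop c 1 []).flatMap
        (fun x => ((dcLoop c 1 []).filter (fun y => decide (x*y < c))).map (fun y => x*y))))
      (fun d => d)
    = (PySem.List.pyRange 1 c 1).filter (fun d => decide (PySem.Int.mod (c*c) d = 0)) := by
  apply PySem.List.sorted_eq_of_perm_of_pairwise_lt
  · rw [List.perm_ext_iff_of_nodup ((PySem.List.nodup_pyRange_one 1 c).filter _)
      (PySem.Set.nodup_ofList _)]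
    intro a
    rw [PySem.Set.mem_ofList, mem_prod c a hc, List.mem_filter]
    rw [PySem.List.mem_pyRange_one]
    simp only [decide_eq_true_eq, PySem.Int.mod_eq_zero_iff_dvd]
    constructor
    · rintro ⟨⟨h1, h2⟩, h3⟩; exact ⟨by omega, h2, h3⟩
    · rintro ⟨h1, h2, h3⟩; exact ⟨⟨by omega, h2⟩, h3⟩
  · exact (PySem.List.pairwise_lt_pyRange_one 1 c).filter _

theorem solve_main (c : Int) (hc : 2 ≤ c) : solve c = solve_alt c := by
  rw [solve_eq_canon c hc, solve_alt]
  rw [ds_eq c hc]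

-- ===== VERDICT (by name: the statement is the Claim_ definition above) =====
theorem solve_spec : Claim_equal_solve := by
  intro c _
  unfold Spec_solve
  by_cases h : c ≤ 1
  · exact solve_small c h
  · exact solve_main c (by omega)
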